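-- pv_equiv track=rewrite | github.com/rabyj/IFT712 | TP1/prog/solution_regression.py | separation_k_blocs
-- ===== SOURCE A (Python) =====
-- def separation_k_blocs(N, k):
--     """Retourne la liste d'index permettant de separer un vecteur de taille N en k blocs."""
--     # On va avoir 'N%k' blocs de taille 'N//k + 1' et
--     # 'k - N%k' blocs de taille 'N//k'
--     taille_bloc = N // k
--     nb_blocs_diff = N % k
--
--     # Creation de la liste de selection d'index (index_debut, index_fin)
--     bloc_courant = 0
--     debut = 0
--     selection = []
--
--     # blocs de taille 'N//k + 1'
--     while bloc_courant < nb_blocs_diff: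
--         fin = debut + taille_bloc + 1
--         selection.append((debut, fin))
--         debut = fin
--         bloc_courant += 1
--
--     # blocs de taille 'N//k'
--     while bloc_courant < k:
--         fin = debut + taille_bloc
--         selection.append((debut, fin))
--         debut = fin
--         bloc_courant += 1
--
--     return selection
-- ===== SOURCE B (Python) =====
-- def separation_k_blocs(N, k):
--     """Retourne la liste d'index permettant de separer un vecteur de taille N en k blocs."""
--     q, r = divmod(N, k)
--     def bound(i):
--         return i * q + min(i, r)
--     return [(bound(i), bound(i + 1)) for i in range(k)]
-- ===== Notes on version B (the rewrite author's own statement) =====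
-- stated objective: simpler
-- what changed: Replaces the running 'debut' accumulator and the two sequential while-loops with a single closed-form boundary formula bound(i)=i*q+min(i,r) applied over range(k).
import Mathlib
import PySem

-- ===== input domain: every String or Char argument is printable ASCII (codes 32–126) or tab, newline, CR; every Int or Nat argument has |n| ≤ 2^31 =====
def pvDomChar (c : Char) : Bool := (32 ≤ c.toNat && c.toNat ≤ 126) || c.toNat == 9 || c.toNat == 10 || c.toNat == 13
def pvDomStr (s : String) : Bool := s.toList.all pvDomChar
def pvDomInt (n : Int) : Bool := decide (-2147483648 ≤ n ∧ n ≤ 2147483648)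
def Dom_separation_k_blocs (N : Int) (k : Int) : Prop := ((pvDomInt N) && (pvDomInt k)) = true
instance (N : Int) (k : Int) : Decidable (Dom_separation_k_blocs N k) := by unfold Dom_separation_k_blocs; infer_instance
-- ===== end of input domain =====

-- B replaces A's two sequential while-loops with running 'debut' state by the closed-form
-- boundary formula bound(i) = i*q + min(i, r) mapped over range(k); same O(k) cost, simpler.


-- ===== PORT A =====
-- first while-loop: blocks of size taille_bloc + 1, while bloc_courant < nb_blocs_diff
def sepLoop1 (nb_blocs_diff taille_bloc : Int) (bloc_courant debut : Int)
    (selection : List (Int × Int)) : Int × Int × List (Int × Int) :=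
  if bloc_courant < nb_blocs_diff then
    let fin := debut + taille_bloc + 1
    sepLoop1 nb_blocs_diff taille_bloc (bloc_courant + 1) fin (selection ++ [(debut, fin)])
  else (bloc_courant, debut, selection)
termination_by (nb_blocs_diff - bloc_courant).toNat
decreasing_by omega

-- second while-loop: blocks of size taille_bloc, while bloc_courant < k
def sepLoop2 (k taille_bloc : Int) (bloc_courant debut : Int)
    (selection : List (Int × Int)) : Int × Int × List (Int × Int) :=
  if bloc_courant < k then
    let fin := debut + taille_bloc
    sepLoop2 k taille_bloc (bloc_courant + 1) fin (selection ++ [(debut, fin)])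
  else (bloc_courant, debut, selection)
termination_by (k - bloc_courant).toNat
decreasing_by omega

def separation_k_blocs (N : Int) (k : Int) : List (Int × Int) :=
  let taille_bloc := PySem.Int.floordiv N k
  let nb_blocs_diff := PySem.Int.mod N k
  let s1 := sepLoop1 nb_blocs_diff taille_bloc 0 0 []
  (sepLoop2 k taille_bloc s1.1 s1.2.1 s1.2.2).2.2

-- ===== PORT B =====
def sepBound (q r i : Int) : Int := i * q + min i r

def separation_k_blocs_alt (N : Int) (k : Int) : List (Int × Int) :=
  let q := PySem.Int.floordiv N k
  let r := PySem.Int.mod N k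
  (PySem.List.pyRange 0 k 1).map (fun i => (sepBound q r i, sepBound q r (i + 1)))

-- ===== PRECONDITION & SPEC =====
-- Pre_ excludes exactly k = 0, on which Python's '//' and '%' (A) and divmod (B) raise ZeroDivisionError.
def Pre_separation_k_blocs (N : Int) (k : Int) : Prop := k ≠ 0
instance (N : Int) (k : Int) : Decidable (Pre_separation_k_blocs N k) := by
  unfold Pre_separation_k_blocs; infer_instance

def pvWitness_separation_k_blocs : Int × Int := (10, 3)

def Spec_separation_k_blocs (N : Int) (k : Int) (out : List (Int × Int)) : Prop := out = separation_k_blocs_alt N k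
instance (N : Int) (k : Int) (out : List (Int × Int)) : Decidable (Spec_separation_k_blocs N k out) := by unfold Spec_separation_k_blocs; infer_instance

-- ===== CLAIM (what is proved, stated in full; the proofs are below) =====
def Claim_equal_separation_k_blocs : Prop := ∀ (N : Int) (k : Int), Dom_separation_k_blocs N k → Pre_separation_k_blocs N k → Spec_separation_k_blocs N k (separation_k_blocs N k)

-- ===== LEMMAS AND PROOFS =====

-- common shape: the list of n blocks starting at index i, with boundaries sepBound
def sepBlocks (q r : Int) : Nat → Int → List (Int × Int)
  | 0, _ => []
  | n + 1, i => (sepBound q r i, sepBound q r (i + 1)) :: sepBlocks q r n (i + 1)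

theorem sepBlocks_append (q r : Int) (m n : Nat) (i : Int) :
    sepBlocks q r (m + n) i = sepBlocks q r m i ++ sepBlocks q r n (i + m) := by
  induction m generalizing i with
  | zero => simp [sepBlocks]
  | succ m ih =>
      have : m + 1 + n = (m + n) + 1 := by omega
      rw [this]
      simp only [sepBlocks, ih (i + 1), List.cons_append]
      congr 2
      push_cast; ring

theorem map_pyRange_eq_sepBlocks (q r j k : Int) (n : Nat) (h : j + n = k) :
    (PySem.List.pyRange j k 1).map (fun i => (sepBound q r i, sepBound q r (i + 1)))
      = sepBlocks q r n j := by
  induction n generalizing j with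
  | zero =>
      have : ¬ j < k := by omega
      rw [PySem.List.pyRange]
      simp [this, sepBlocks]
  | succ n ih =>
      have hjk : j < k := by omega
      rw [PySem.List.pyRange_one_cons hjk]
      simp only [List.map_cons, sepBlocks]
      rw [ih (j + 1) (by omega)]

theorem sepLoop1_spec (r q : Int) (n : Nat) (j : Int) (sel : List (Int × Int))
    (hj : j + n = r) (hj0 : 0 ≤ j) :
    sepLoop1 r q j (j * (q + 1)) sel = (r, r * (q + 1), sel ++ sepBlocks q r n j) := by
  induction n generalizing j sel with
  | zero =>
      have hje : j = r := by omega
      rw [sepLoop1]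
      simp [hje, sepBlocks]
  | succ n ih =>
      have hjr : j < r := by omega
      rw [sepLoop1]
      simp only [hjr, if_pos]
      have hfin : j * (q + 1) + q + 1 = (j + 1) * (q + 1) := by ring
      rw [hfin, ih (j + 1) _ (by omega) (by omega)]
      have hb1 : sepBound q r j = j * (q + 1) := by
        simp only [sepBound]; rw [min_eq_left (by omega : j ≤ r)]; ring
      have hb2 : sepBound q r (j + 1) = (j + 1) * (q + 1) := by
        simp only [sepBound]; rw [min_eq_left (by omega : j + 1 ≤ r)]; ring
      simp [sepBlocks, hb1, hb2]

theorem sepLoop2_spec (k q r : Int) (n : Nat) (j : Int) (sel : List (Int × Int))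
    (hj : j + n = k) (hjr : r ≤ j) :
    sepLoop2 k q j (j * q + r) sel = (k, k * q + r, sel ++ sepBlocks q r n j) := by
  induction n generalizing j sel with
  | zero =>
      have hje : j = k := by omega
      rw [sepLoop2]
      simp [hje, sepBlocks]
  | succ n ih =>
      have hjk : j < k := by omega
      rw [sepLoop2]
      simp only [hjk, if_pos]
      have hfin : j * q + r + q = (j + 1) * q + r := by ring
      rw [hfin, ih (j + 1) _ (by omega) (by omega)]
      have hb1 : sepBound q r j = j * q + r := by
        simp only [sepBound]; rw [min_eq_right (by omega : r ≤ j)]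
      have hb2 : sepBound q r (j + 1) = (j + 1) * q + r := by
        simp only [sepBound]; rw [min_eq_right (by omega : r ≤ j + 1)]
      simp [sepBlocks, hb1, hb2]

theorem separation_k_blocs_eq_sepBlocks (N k : Int) (hk : 0 < k) :
    separation_k_blocs N k
      = sepBlocks (PySem.Int.floordiv N k) (PySem.Int.mod N k) k.toNat 0 := by
  set q := PySem.Int.floordiv N k with hq
  set r := PySem.Int.mod N k with hr
  have hr0 : 0 ≤ r := PySem.Int.mod_nonneg N hk
  have hrk : r < k := PySem.Int.mod_lt N hk
  simp only [separation_k_blocs, ← hq, ← hr]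
  have h1 : sepLoop1 r q 0 0 [] = (r, r * (q + 1), sepBlocks q r r.toNat 0) := by
    have := sepLoop1_spec r q r.toNat 0 [] (by omega) le_rfl
    simpa using this
  rw [h1]
  have hrq : r * (q + 1) = r * q + r := by ring
  rw [hrq]
  have h2 := sepLoop2_spec k q r (k - r).toNat r (sepBlocks q r r.toNat 0) (by omega) le_rfl
  rw [h2]
  have hsplit : k.toNat = r.toNat + (k - r).toNat := by omega
  rw [hsplit, sepBlocks_append]
  have hidx : (0 : Int) + ((r.toNat : Nat) : Int) = r := by omega
  rw [hidx]

-- ===== VERDICT (by name: the statement is the Claim_ definition above) =====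
theorem separation_k_blocs_spec : Claim_equal_separation_k_blocs := by
  intro N k _ hk
  unfold Spec_separation_k_blocs separation_k_blocs_alt
  by_cases hpos : 0 < k
  · rw [separation_k_blocs_eq_sepBlocks N k hpos]
    rw [map_pyRange_eq_sepBlocks _ _ 0 k k.toNat (by omega)]
  · -- k < 0: both loops of A run zero times and B's range(k) is empty
    have hkneg : k < 0 := by
      rcases lt_trichotomy k 0 with h | h | h
      · exact h
      · exact absurd h hk
      · exact absurd h hpos
    have hmod := PySem.Int.mod_neg_bounds N hkneg
    have e1 : sepLoop1 (PySem.Int.mod N k) (PySem.Int.floordiv N k) 0 0 []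
        = (0, 0, []) := by
      rw [sepLoop1]; simp [show ¬ (0 : Int) < PySem.Int.mod N k by omega]
    have e2 : sepLoop2 k (PySem.Int.floordiv N k) 0 0 [] = (0, 0, []) := by
      rw [sepLoop2]; simp [show ¬ (0 : Int) < k by omega]
    simp only [separation_k_blocs, e1, e2]
    rw [PySem.List.pyRange]
    simp [show ¬ (0 : Int) < k by omega]
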